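-- pv_equiv track=rewrite | github.com/AdrielJCortez/CSC-202 | project1/bears.py | bears
-- ===== SOURCE A (Python) =====
-- def bears(n: int, attempted: list = None) -> bool:
--     if attempted is None:
--         attempted = []
--
--     if n in attempted:
--         return False
--     else:
--         attempted.append(n)
--
--     if n == 42:
--         return True
--     elif n < 42:
--         return False
--     else:
--         last_number = int(str(n)[-1])
--         second_to_last_number = int(str(n)[-2])
--         product = last_number * second_to_last_number
--
--         if (n % 5 == 0) and bears(n - 42, attempted):
--             return True
--         elif (n % 2 == 0) and bears(n // 2, attempted):
--             return True
--         elif (n % 4 == 0 or n % 3 == 0) and bears(n - product, attempted):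
--             return True
--         else:
--             return False
-- ===== SOURCE B (Python) =====
-- def bears(n: int, attempted: list = None) -> bool:
--     if attempted is None:
--         attempted = []
--     stack = [n]
--     while stack:
--         m = stack.pop()
--         if m in attempted:
--             continue
--         attempted.append(m)
--         if m == 42:
--             return True
--         if m < 42:
--             continue
--         product = int(str(m)[-1]) * int(str(m)[-2])
--         succs = []
--         if m % 5 == 0:
--             succs.append(m - 42)
--         if m % 2 == 0:
--             succs.append(m // 2)
--         if m % 4 == 0 or m % 3 == 0:
--             succs.append(m - product)
--         stack.extend(reversed(succs))
--     return False
-- ===== Notes on version B (the rewrite author's own statement) =====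
-- stated objective: alternative
-- what changed: A's recursive pruned DFS (nested short-circuit 'and' recursion with a shared visited list) is replaced by an iterative DFS driving an explicit LIFO stack, popping a node, skipping already-attempted ones, and pushing the applicable successors so they are explored in A's branch order.
import Mathlib
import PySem

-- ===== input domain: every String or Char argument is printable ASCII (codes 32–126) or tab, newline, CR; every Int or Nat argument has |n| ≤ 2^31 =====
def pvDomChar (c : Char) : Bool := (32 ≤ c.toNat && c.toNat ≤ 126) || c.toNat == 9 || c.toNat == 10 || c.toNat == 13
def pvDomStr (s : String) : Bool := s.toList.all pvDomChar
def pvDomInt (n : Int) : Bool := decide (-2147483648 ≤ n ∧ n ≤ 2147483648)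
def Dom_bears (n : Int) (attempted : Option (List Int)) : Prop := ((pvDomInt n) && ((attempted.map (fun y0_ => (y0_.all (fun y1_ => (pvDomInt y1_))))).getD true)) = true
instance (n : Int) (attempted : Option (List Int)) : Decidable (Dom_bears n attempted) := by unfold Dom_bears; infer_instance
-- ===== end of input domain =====

-- B replaces A's recursive DFS by an explicit-stack iterative DFS (same traversal order, same
-- in-place appends to `attempted`); objective: alternative decomposition, not faster.


-- ===== PORT A =====
-- `pyDigit s i` is Python's `int(s[i])`; the `.getD 0` default is never reached on the inputs
-- the ports feed it (both programs only index `str(n)` for n ≥ 43, a string of ≥ 2 digit chars).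
def pyDigit (s : String) (i : Int) : Int :=
  ((PySem.Str.pyGet? s i).bind (fun c => PySem.Int.ofChars? [c])).getD 0

/-- Port of A's recursive body, with a fuel guard for totality (never exhausted: see `AF_eq`).
    Python mutates `attempted` across the recursive calls, so the port threads that state
    explicitly: `bearsAF fuel n att` returns (A's boolean, the values A appends to
    `attempted`, in order). Branches are A's, in A's order, with Python's short-circuit
    `and` (no recursive call when the mod test fails). -/
def bearsAF (fuel : Nat) (n : Int) (att : List Int) : Bool × List Int :=
  match fuel with
  | 0 => (false, [])
  | f + 1 =>
    if n ∈ att then (false, [])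
    else if n = 42 then (true, [n])
    else if n < 42 then (false, [n])
    else
      let s := PySem.Int.toStr n
      let product := pyDigit s (-1) * pyDigit s (-2)
      let p1 := if PySem.Int.mod n 5 = 0 then bearsAF f (n - 42) (att ++ [n]) else (false, [])
      if p1.1 then (true, n :: p1.2)
      else
        let p2 := if PySem.Int.mod n 2 = 0 then bearsAF f (PySem.Int.floordiv n 2) (att ++ [n] ++ p1.2) else (false, [])
        if p2.1 then (true, n :: (p1.2 ++ p2.2))
        else
          let p3 := if PySem.Int.mod n 4 = 0 ∨ PySem.Int.mod n 3 = 0 then bearsAF f (n - product) (att ++ [n] ++ p1.2 ++ p2.2) else (false, [])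
          if p3.1 then (true, n :: (p1.2 ++ (p2.2 ++ p3.2)))
          else (false, n :: (p1.2 ++ (p2.2 ++ p3.2)))

-- The equivalence proved below is about the RETURN value; A also mutates a caller-supplied
-- `attempted` in place (B performs exactly the same appends, in the same order).
def bears (n : Int) (attempted : Option (List Int)) : Bool :=
  (bearsAF ((n - 42).toNat + 1) n (attempted.getD [])).1

-- ===== PORT B =====
def stackBound (s : List Int) : Int := s.foldr max 42

/-- Source B's `succs` list for a node `m > 42` (the applicable successors, in A's branch order). -/
def altSuccs (m : Int) : List Int :=
  let product := pyDigit (PySem.Int.toStr m) (-1) * pyDigit (PySem.Int.toStr m) (-2)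
  (if PySem.Int.mod m 5 = 0 then [m - 42] else []) ++
  (if PySem.Int.mod m 2 = 0 then [PySem.Int.floordiv m 2] else []) ++
  (if PySem.Int.mod m 4 = 0 ∨ PySem.Int.mod m 3 = 0 then [m - product] else [])

/-- Source B's `while stack:` loop, with a fuel guard for totality (never exhausted: see `LF_eq`).
    The Lean list's HEAD is the TOP of Source B's stack (Python pops from the end and pushes
    `reversed(succs)`, so `stack.extend(reversed(succs))` is `altSuccs m ++ rest` here);
    `att` is the `attempted` list Source B appends to. -/
def altLoopF (fuel : Nat) (stack : List Int) (att : List Int) : Bool :=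
  match fuel with
  | 0 => false
  | f + 1 =>
    match stack with
    | [] => false
    | m :: rest =>
      if m ∈ att then altLoopF f rest att
      else if m = 42 then true
      else if m < 42 then altLoopF f rest (att ++ [m])
      else altLoopF f (altSuccs m ++ rest) (att ++ [m])

def bears_alt (n : Int) (attempted : Option (List Int)) : Bool :=
  altLoopF (3 * (stackBound [n] - 42).toNat + 2) [n] (attempted.getD [])

-- ===== PRECONDITION & SPEC =====
def Spec_bears (n : Int) (attempted : Option (List Int)) (out : Bool) : Prop := out = bears_alt n attempted
instance (n : Int) (attempted : Option (List Int)) (out : Bool) : Decidable (Spec_bears n attempted out) := by unfold Spec_bears; infer_instance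

-- ===== CLAIM (what is proved, stated in full; the proofs are below) =====
def Claim_equal_bears : Prop := ∀ (n : Int) (attempted : Option (List Int)), Dom_bears n attempted → Spec_bears n attempted (bears n attempted)

-- ===== LEMMAS AND PROOFS =====
-- Termination/fuel-sufficiency measure: how many integers in (42, n] are not yet in
-- `attempted` — it strictly drops at every expansion.
def iccList (n : Int) : List Int := (List.range (n - 42).toNat).map (fun k : Nat => (43 : Int) + k)

def bearsMeasure (n : Int) (att : List Int) : Nat :=
  ((iccList n).filter (fun k => decide (k ∉ att))).length

theorem digit_nonneg (c : Char) : 0 ≤ (PySem.Int.ofChars? [c]).getD 0 := by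
  by_cases hm : c = '-'
  · subst hm; decide
  by_cases hp : c = '+'
  · subst hp; decide
  have gen2 : ∀ (o : Option ℕ), 0 ≤ ((Option.map (fun n : ℤ => n) (do let a ← o; pure ((a : ℤ)))).getD 0) := by
    intro o; cases o <;> simp
  unfold PySem.Int.ofChars?
  by_cases hs : PySem.Int.isIntSpace c
  · simp only [List.dropWhile, hs, List.reverse_nil]
    exact gen2 _
  · simp only [List.dropWhile, hs, List.reverse_cons, List.reverse_nil, List.nil_append]
    split
    · rename_i ds heq; rw [List.cons.injEq] at heq; exact absurd heq.1 hm
    · rename_i ds heq; rw [List.cons.injEq] at heq; exact absurd heq.1 hp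
    · exact gen2 _

theorem pyDigit_nonneg (s : String) (i : Int) : 0 ≤ pyDigit s i := by
  unfold pyDigit
  cases h : PySem.Str.pyGet? s i with
  | none => simp
  | some c => simp only [Option.bind_some]; exact digit_nonneg c

theorem mem_iccList {n k : Int} : k ∈ iccList n ↔ 43 ≤ k ∧ k ≤ n := by
  simp only [iccList, List.mem_map, List.mem_range]
  constructor
  · rintro ⟨j, hj, rfl⟩; omega
  · intro hk; exact ⟨(k - 43).toNat, by omega, by omega⟩

theorem nodup_iccList (n : Int) : (iccList n).Nodup :=
  List.Nodup.map (fun a b h => by omega) List.nodup_range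

theorem iccList_sublist {M' M : Int} (h : M' ≤ M) : (iccList M').Sublist (iccList M) :=
  List.Sublist.map _ (List.range_sublist.mpr (by omega))

theorem bearsMeasure_le (M : Int) (a : List Int) : bearsMeasure M a ≤ (M - 42).toNat := by
  unfold bearsMeasure
  calc ((iccList M).filter _).length ≤ (iccList M).length := List.length_filter_le _ _
    _ = (M - 42).toNat := by simp [iccList]

theorem bearsMeasure_mono {M' M : Int} {a a' : List Int} (h : M' ≤ M)
    (hsub : ∀ x ∈ a, x ∈ a') : bearsMeasure M' a' ≤ bearsMeasure M a := by
  unfold bearsMeasure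
  calc ((iccList M').filter (fun k => decide (k ∉ a'))).length
      ≤ ((iccList M).filter (fun k => decide (k ∉ a'))).length :=
        ((iccList_sublist h).filter _).length_le
    _ ≤ _ := by
        simp only [← List.countP_eq_length_filter]
        exact List.countP_mono_left (fun x _ hx => by
          simp only [decide_eq_true_eq] at hx ⊢; exact fun hxa => hx (hsub x hxa))

theorem bearsMeasure_lt {M' M w : Int} {a a' : List Int} (hMM : M' ≤ M)
    (hw43 : 43 ≤ w) (hwM : w ≤ M) (hwa : w ∉ a) (hwa' : w ∈ a')
    (hsub : ∀ x ∈ a, x ∈ a') : bearsMeasure M' a' < bearsMeasure M a := by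
  unfold bearsMeasure
  set f' := (iccList M').filter (fun k => decide (k ∉ a')) with hf'
  set f := (iccList M).filter (fun k => decide (k ∉ a)) with hf
  have hfnd : f.Nodup := (nodup_iccList M).filter _
  have hwf : w ∈ f := by
    rw [hf, List.mem_filter]; exact ⟨mem_iccList.mpr ⟨hw43, hwM⟩, by simpa using hwa⟩
  have hsub2 : f' ⊆ f.erase w := by
    intro k hk
    rw [hf', List.mem_filter] at hk
    have h1 := mem_iccList.mp hk.1
    have hk2 : k ∉ a' := by simpa using hk.2
    rw [List.Nodup.mem_erase_iff hfnd]
    refine ⟨fun hkw => hk2 (hkw ▸ hwa'), ?_⟩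
    rw [hf, List.mem_filter]
    exact ⟨mem_iccList.mpr ⟨h1.1, h1.2.trans hMM⟩, by simp; exact fun hka => hk2 (hsub k hka)⟩
  have hnd' : f'.Nodup := (nodup_iccList M').filter _
  calc f'.length ≤ (f.erase w).length := (hnd'.subperm hsub2).length_le
    _ < f.length := by rw [List.length_erase_of_mem hwf]; have := List.length_pos_of_mem hwf; omega

theorem decA (n : Int) (a' att : List Int) (m : Int) (hm : m ≤ n) (h2 : ¬ n = 42) (h3 : ¬ n < 42)
    (ha' : ∃ t, a' = att ++ [n] ++ t) (h1 : n ∉ att) :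
    bearsMeasure m a' < bearsMeasure n att := by
  obtain ⟨t, rfl⟩ := ha'
  exact bearsMeasure_lt hm (by omega) le_rfl h1 (by simp) (fun x hx => by simp [hx])

theorem decA_div (n : Int) (h3 : ¬ n < 42) : PySem.Int.floordiv n 2 ≤ n := by
  rw [PySem.Int.floordiv_eq_ediv_of_pos (by omega)]; exact Int.ediv_le_self _ (by omega)

theorem decA_prod (n : Int) :
    0 ≤ pyDigit (PySem.Int.toStr n) (-1) * pyDigit (PySem.Int.toStr n) (-2) :=
  mul_nonneg (pyDigit_nonneg _ _) (pyDigit_nonneg _ _)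

/-- Proof-side well-founded version of `bearsAF` (no fuel); `AF_eq` bridges the two. -/
def bearsA (n : Int) (att : List Int) : Bool × List Int :=
  if n ∈ att then (false, [])
  else if n = 42 then (true, [n])
  else if n < 42 then (false, [n])
  else
    let s := PySem.Int.toStr n
    let product := pyDigit s (-1) * pyDigit s (-2)
    let p1 := if PySem.Int.mod n 5 = 0 then bearsA (n - 42) (att ++ [n]) else (false, [])
    if p1.1 then (true, n :: p1.2)
    else
      let p2 := if PySem.Int.mod n 2 = 0 then bearsA (PySem.Int.floordiv n 2) (att ++ [n] ++ p1.2) else (false, [])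
      if p2.1 then (true, n :: (p1.2 ++ p2.2))
      else
        let p3 := if PySem.Int.mod n 4 = 0 ∨ PySem.Int.mod n 3 = 0 then bearsA (n - product) (att ++ [n] ++ p1.2 ++ p2.2) else (false, [])
        if p3.1 then (true, n :: (p1.2 ++ (p2.2 ++ p3.2)))
        else (false, n :: (p1.2 ++ (p2.2 ++ p3.2)))
termination_by bearsMeasure n att
decreasing_by
  · exact decA n _ att (n - 42) (by omega) (by assumption) (by assumption) ⟨[], by simp⟩ (by assumption)
  · exact decA n _ att (PySem.Int.floordiv n 2) (decA_div n (by assumption)) (by assumption) (by assumption) ⟨_, rfl⟩ (by assumption)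
  · exact decA n _ att _ (by have := decA_prod n; omega) (by assumption) (by assumption) ⟨_, List.append_assoc _ _ _⟩ (by assumption)

theorem AF_eq : ∀ (f : Nat) (n : Int) (att : List Int), bearsMeasure n att < f →
    bearsAF f n att = bearsA n att := by
  intro f
  induction f with
  | zero => intro n att h; omega
  | succ f ih =>
    intro n att h
    rw [bearsA]
    by_cases hmem : n ∈ att
    · simp [bearsAF, hmem]
    by_cases h42 : n = 42
    · subst h42; simp [bearsAF, hmem]
    by_cases hlt : n < 42
    · simp [bearsAF, hmem, h42, hlt]
    simp only [bearsAF, if_neg hmem, if_neg h42, if_neg hlt]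
    have hle : bearsMeasure n att ≤ f := by omega
    have e1 : (if PySem.Int.mod n 5 = 0 then bearsAF f (n - 42) (att ++ [n]) else (false, ([] : List Int))) =
              (if PySem.Int.mod n 5 = 0 then bearsA (n - 42) (att ++ [n]) else (false, [])) := by
      split_ifs
      · exact ih _ _ (lt_of_lt_of_le (decA n _ att _ (by omega) h42 hlt ⟨[], by simp⟩ hmem) hle)
      · rfl
    rw [e1]
    have e2 : ∀ t1 : List Int,
        (if PySem.Int.mod n 2 = 0 then bearsAF f (PySem.Int.floordiv n 2) (att ++ [n] ++ t1) else (false, ([] : List Int))) =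
        (if PySem.Int.mod n 2 = 0 then bearsA (PySem.Int.floordiv n 2) (att ++ [n] ++ t1) else (false, [])) := by
      intro t1
      split_ifs
      · exact ih _ _ (lt_of_lt_of_le (decA n _ att _ (decA_div n hlt) h42 hlt ⟨t1, rfl⟩ hmem) hle)
      · rfl
    rw [e2]
    have e3 : ∀ t : List Int,
        (if PySem.Int.mod n 4 = 0 ∨ PySem.Int.mod n 3 = 0 then
            bearsAF f (n - pyDigit (PySem.Int.toStr n) (-1) * pyDigit (PySem.Int.toStr n) (-2)) (att ++ [n] ++ t) else (false, ([] : List Int))) =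
        (if PySem.Int.mod n 4 = 0 ∨ PySem.Int.mod n 3 = 0 then
            bearsA (n - pyDigit (PySem.Int.toStr n) (-1) * pyDigit (PySem.Int.toStr n) (-2)) (att ++ [n] ++ t) else (false, [])) := by
      intro t
      split_ifs
      · exact ih _ _ (lt_of_lt_of_le (decA n _ att _ (by have := decA_prod n; omega) h42 hlt ⟨t, rfl⟩ hmem) hle)
      · rfl
    have e3' := fun t1 t2 : List Int => by
      have := e3 (t1 ++ t2)
      rwa [← List.append_assoc (att ++ [n]) t1 t2] at this
    rw [e3']

theorem stackBound_cons_le {m : Int} {rest : List Int} : m ≤ stackBound (m :: rest) :=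
  le_max_left _ _

theorem stackBound_tail_le {m : Int} {rest : List Int} : stackBound rest ≤ stackBound (m :: rest) :=
  le_max_right _ _

theorem stackBound_append_le {xs rest : List Int} {m : Int} (h : ∀ x ∈ xs, x ≤ m) :
    stackBound (xs ++ rest) ≤ stackBound (m :: rest) := by
  induction xs with
  | nil => exact stackBound_tail_le
  | cons x xs ih =>
      have : stackBound (x :: (xs ++ rest)) = max x (stackBound (xs ++ rest)) := rfl
      rw [List.cons_append, this]
      exact max_le ((h x (by simp)).trans stackBound_cons_le)
        (ih (fun y hy => h y (by simp [hy])))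

theorem altSuccs_le {m x : Int} (hm : ¬ m < 42) (hx : x ∈ altSuccs m) : x ≤ m := by
  have h1 := pyDigit_nonneg (PySem.Int.toStr m) (-1)
  have h2 := pyDigit_nonneg (PySem.Int.toStr m) (-2)
  have hp := decA_prod m
  have hdiv := decA_div m hm
  simp only [altSuccs, List.mem_append] at hx
  rcases hx with (hx | hx) | hx <;> split_ifs at hx <;> simp at hx <;> omega

theorem altSuccs_length (m : Int) : (altSuccs m).length ≤ 3 := by
  simp only [altSuccs, List.length_append]
  split_ifs <;> simp

theorem lex_helper {a1 a2 b1 b2 : Nat} (ha : a1 ≤ a2) (hb : b1 < b2) :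
    Prod.Lex (· < ·) (· < ·) (a1, b1) (a2, b2) := by
  rcases lt_or_eq_of_le ha with h | h
  · exact Prod.Lex.left _ _ h
  · subst h; exact Prod.Lex.right _ hb

theorem decL1 (m : Int) (rest att : List Int) :
    Prod.Lex (· < ·) (· < ·) (bearsMeasure (stackBound rest) att, rest.length)
      (bearsMeasure (stackBound (m :: rest)) att, (m :: rest).length) :=
  lex_helper (bearsMeasure_mono stackBound_tail_le (fun x hx => hx)) (by simp)

theorem decL2 (m : Int) (rest att : List Int) :
    Prod.Lex (· < ·) (· < ·) (bearsMeasure (stackBound rest) (att ++ [m]), rest.length)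
      (bearsMeasure (stackBound (m :: rest)) att, (m :: rest).length) :=
  lex_helper (bearsMeasure_mono stackBound_tail_le (fun x hx => by simp [hx])) (by simp)

theorem decL3_meas (m : Int) (rest att : List Int) (h1 : m ∉ att) (h2 : ¬ m = 42) (h3 : ¬ m < 42) :
    bearsMeasure (stackBound (altSuccs m ++ rest)) (att ++ [m]) <
      bearsMeasure (stackBound (m :: rest)) att :=
  bearsMeasure_lt (stackBound_append_le (fun x hx => altSuccs_le h3 hx))
    (by omega) stackBound_cons_le h1 (by simp) (fun x hx => by simp [hx])

theorem decL3 (m : Int) (rest att : List Int) (h1 : m ∉ att) (h2 : ¬ m = 42) (h3 : ¬ m < 42) :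
    Prod.Lex (· < ·) (· < ·)
      (bearsMeasure (stackBound (altSuccs m ++ rest)) (att ++ [m]), (altSuccs m ++ rest).length)
      (bearsMeasure (stackBound (m :: rest)) att, (m :: rest).length) :=
  Prod.Lex.left _ _ (decL3_meas m rest att h1 h2 h3)

/-- Proof-side well-founded version of `altLoopF` (no fuel); `LF_eq` bridges the two. -/
def altLoop (stack : List Int) (att : List Int) : Bool :=
  match stack with
  | [] => false
  | m :: rest =>
    if m ∈ att then altLoop rest att
    else if m = 42 then true
    else if m < 42 then altLoop rest (att ++ [m])
    else altLoop (altSuccs m ++ rest) (att ++ [m])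
termination_by (bearsMeasure (stackBound stack) att, stack.length)
decreasing_by
  · exact decL1 m rest att
  · exact decL2 m rest att
  · exact decL3 m rest att (by assumption) (by assumption) (by assumption)

theorem LF_eq : ∀ (f : Nat) (stack att : List Int),
    3 * bearsMeasure (stackBound stack) att + stack.length < f →
    altLoopF f stack att = altLoop stack att := by
  intro f
  induction f with
  | zero => intro stack att h; omega
  | succ f ih =>
    intro stack att h
    cases stack with
    | nil => simp [altLoopF, altLoop]
    | cons m rest =>
      rw [altLoop]
      simp only [altLoopF]
      have hmono1 := bearsMeasure_mono (stackBound_tail_le (m := m) (rest := rest)) (fun x (hx : x ∈ att) => hx)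
      by_cases hmem : m ∈ att
      · rw [if_pos hmem, if_pos hmem]
        exact ih rest att (by simp only [List.length_cons] at h; omega)
      rw [if_neg hmem, if_neg hmem]
      by_cases h42 : m = 42
      · rw [if_pos h42, if_pos h42]
      rw [if_neg h42, if_neg h42]
      by_cases hlt : m < 42
      · rw [if_pos hlt, if_pos hlt]
        have hmono2 := bearsMeasure_mono (stackBound_tail_le (m := m) (rest := rest))
          (fun x (hx : x ∈ att) => (by simp [hx] : x ∈ att ++ [m]))
        exact ih rest (att ++ [m]) (by simp only [List.length_cons] at h; omega)
      · rw [if_neg hlt, if_neg hlt]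
        have hm := decL3_meas m rest att hmem h42 hlt
        have hlen : (altSuccs m ++ rest).length ≤ rest.length + 3 := by
          rw [List.length_append]; have := altSuccs_length m; omega
        exact ih (altSuccs m ++ rest) (att ++ [m]) (by simp only [List.length_cons] at h; omega)

/-- Run A's search on each stack entry in turn (with short-circuit on success), returning the
    combined boolean and combined appended values — the bridge between the two ports. -/
def chain (cs : List Int) (att : List Int) : Bool × List Int :=
  match cs with
  | [] => (false, [])
  | c :: cs' =>
    let p := bearsA c att
    if p.1 then (true, p.2)
    else
      let q := chain cs' (att ++ p.2)
      (q.1, p.2 ++ q.2)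

theorem bearsA_expand {m : Int} (att : List Int) (h1 : m ∉ att) (h2 : ¬ m = 42) (h3 : ¬ m < 42) :
    bearsA m att = ((chain (altSuccs m) (att ++ [m])).1, m :: (chain (altSuccs m) (att ++ [m])).2) := by
  rw [bearsA]
  simp only [if_neg h1, if_neg h2, if_neg h3, altSuccs]
  by_cases c5 : PySem.Int.mod m 5 = 0 <;> by_cases c2 : PySem.Int.mod m 2 = 0 <;>
    by_cases c43 : PySem.Int.mod m 4 = 0 ∨ PySem.Int.mod m 3 = 0 <;>
      simp only [c5, c2, c43, if_true, if_false, chain,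
        List.nil_append, List.append_nil, List.append_assoc, List.singleton_append] <;>
      split_ifs <;> simp_all [chain, List.append_assoc]

theorem altLoop_chain : ∀ (N : Nat) (cs rest att : List Int),
    bearsMeasure (stackBound (cs ++ rest)) att < N →
    altLoop (cs ++ rest) att =
      (if (chain cs att).1 then true else altLoop rest (att ++ (chain cs att).2)) := by
  intro N
  induction N with
  | zero => intro cs rest att h; omega
  | succ N ih =>
    intro cs
    induction cs with
    | nil => intro rest att hN; simp [chain]
    | cons c cs' ihc =>
      intro rest att hN
      rw [List.cons_append] at hN ⊢
      rw [altLoop]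
      by_cases hmem : c ∈ att
      · rw [if_pos hmem]
        have hb : bearsA c att = (false, []) := by rw [bearsA]; simp [hmem]
        have hch : chain (c :: cs') att = chain cs' att := by
          simp [chain, hb]
        rw [hch]
        exact ihc rest att (lt_of_le_of_lt (bearsMeasure_mono stackBound_tail_le (fun x hx => hx)) hN)
      · rw [if_neg hmem]
        by_cases h42 : c = 42
        · rw [if_pos h42]
          subst h42
          have hb : bearsA (42:Int) att = (true, [42]) := by rw [bearsA]; simp [hmem]
          simp [chain, hb]
        · rw [if_neg h42]
          by_cases hlt : c < 42
          · rw [if_pos hlt]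
            have hb : bearsA c att = (false, [c]) := by
              rw [bearsA]; simp [hmem, h42, hlt]
            have hmeas : bearsMeasure (stackBound (cs' ++ rest)) (att ++ [c]) < N + 1 :=
              lt_of_le_of_lt (bearsMeasure_mono stackBound_tail_le (fun x hx => by simp [hx])) hN
            rw [ihc rest (att ++ [c]) hmeas]
            simp [chain, hb, List.append_assoc]
          · rw [if_neg hlt]
            have hstrict : ∀ M' : Int, M' ≤ stackBound (c :: (cs' ++ rest)) →
                ∀ a' : List Int, c ∈ a' → (∀ x ∈ att, x ∈ a') →
                bearsMeasure M' a' < bearsMeasure (stackBound (c :: (cs' ++ rest))) att :=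
              fun M' hM' a' hc hsub => bearsMeasure_lt hM' (by omega) stackBound_cons_le hmem hc hsub
            have hsuccsle : stackBound (altSuccs c ++ (cs' ++ rest)) ≤ stackBound (c :: (cs' ++ rest)) :=
              stackBound_append_le (fun x hx => altSuccs_le hlt hx)
            have houter : bearsMeasure (stackBound (altSuccs c ++ (cs' ++ rest))) (att ++ [c]) < N := by
              have := hstrict _ hsuccsle (att ++ [c]) (by simp) (fun x hx => by simp [hx])
              omega
            rw [ih (altSuccs c) (cs' ++ rest) (att ++ [c]) houter]
            have hb := bearsA_expand att hmem h42 hlt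
            set pS := chain (altSuccs c) (att ++ [c]) with hpS
            by_cases hr : pS.1
            · simp [chain, hb, hr]
            · have hinner : bearsMeasure (stackBound (cs' ++ rest)) ((att ++ [c]) ++ pS.2) < N + 1 := by
                have := hstrict _ stackBound_tail_le ((att ++ [c]) ++ pS.2) (by simp) (fun x hx => by simp [hx])
                omega
              rw [if_neg hr, ihc rest ((att ++ [c]) ++ pS.2) hinner]
              have hatt : (att ++ [c]) ++ pS.2 = att ++ (c :: pS.2) := by
                simp [List.append_assoc]
              rw [hatt]
              simp [chain, hb, hr, List.append_assoc]

theorem bears_eq_alt (n : Int) (attempted : Option (List Int)) :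
    bears n attempted = bears_alt n attempted := by
  unfold bears bears_alt
  set att := attempted.getD [] with hatt
  rw [AF_eq _ n att (by have := bearsMeasure_le n att; omega)]
  rw [LF_eq _ [n] att (by have := bearsMeasure_le (stackBound [n]) att; simp only [List.length_cons, List.length_nil]; omega)]
  have h := altLoop_chain (bearsMeasure (stackBound ([n] ++ [])) att + 1) [n] [] att (by omega)
  rw [List.append_nil] at h
  rw [h]
  cases hb : bearsA n att with
  | mk r t =>
    cases r <;> simp [chain, hb, altLoop]

-- ===== VERDICT (by name: the statement is the Claim_ definition above) =====
theorem bears_spec : Claim_equal_bears := by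
  intro n attempted _
  unfold Spec_bears
  exact bears_eq_alt n attempted
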